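-- pv_equiv track=rewrite | github.com/Poojacodez/AI | AI CIA 1/b_bgreedy_heursitic.py | branch_and_bound_greedy_heuristic
-- ===== SOURCE A (Python) =====
-- def branch_and_bound_greedy_heuristic(start, goal):
--     open_list = [(start, 0, [start])]  # (node, cost, path)
--     while open_list:
--         node, cost, path = min(open_list, key=lambda x: x[1] + heuristic(x[0], goal))
--         open_list.remove((node, cost, path))
--         if node == goal:
--             return path
--         for neighbor, step_cost in get_neighbors(node):
--             open_list.append((neighbor, cost + step_cost, path + [neighbor]))
--
-- def heuristic(node, goal):
--     return abs(goal - node)  # Example heuristic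
--
-- def get_neighbors(node):
--     return [(node - 1, 1), (node + 1, 1)]  # Dummy neighbors
-- ===== SOURCE B (Python) =====
-- def branch_and_bound_greedy_heuristic(start, goal):
--     # On the +-1 line graph the A* search always walks straight to the goal,
--     # so the path is just the consecutive run of integers from start to goal.
--     step = 1 if goal >= start else -1
--     return list(range(start, goal + step, step))
-- ===== Notes on version B (the rewrite author's own statement) =====
-- stated objective: faster
-- what changed: Replaced the quadratic best-first search over a growing open list (min scan + remove each iteration) with a closed-form emission of the straight run of integers from start to goal via range().
import Mathlib
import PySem

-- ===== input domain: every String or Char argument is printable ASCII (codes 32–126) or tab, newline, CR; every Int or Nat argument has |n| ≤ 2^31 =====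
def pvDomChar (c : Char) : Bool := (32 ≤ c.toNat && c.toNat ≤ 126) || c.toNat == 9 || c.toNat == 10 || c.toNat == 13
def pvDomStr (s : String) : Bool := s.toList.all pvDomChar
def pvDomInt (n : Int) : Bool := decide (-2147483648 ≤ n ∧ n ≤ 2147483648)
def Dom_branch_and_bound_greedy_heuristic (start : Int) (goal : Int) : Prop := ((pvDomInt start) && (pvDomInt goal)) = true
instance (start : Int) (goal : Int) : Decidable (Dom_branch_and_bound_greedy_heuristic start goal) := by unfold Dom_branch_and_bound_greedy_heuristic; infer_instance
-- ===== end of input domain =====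

-- B replaces A's quadratic best-first search over a growing open list with a closed-form
-- range() emission of the straight run of integers from start to goal (faster).

-- ===== PORT A =====
def pvHeuristic (node : Int) (goal : Int) : Int := |goal - node|

def pvGetNeighbors (node : Int) : List (Int × Int) := [(node - 1, 1), (node + 1, 1)]

-- the while-loop; fuel only makes the recursion structural (it never runs out: the search
-- reaches the goal after exactly |goal - start| expansions, see the proof below)
def pvLoop (goal : Int) : Nat → List (Int × Int × List Int) → List Int
  | 0, _ => []
  | fuel + 1, open_list =>
    match PySem.List.min? open_list (fun x => x.2.1 + pvHeuristic x.1 goal) with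
    | none => []   -- open_list empty: while exits (unreachable from the initial state)
    | some (node, cost, path) =>
      let rest := (PySem.List.remove? open_list (node, cost, path)).getD open_list
      if node = goal then path
      else pvLoop goal fuel
        ((pvGetNeighbors node).foldl (fun acc p => acc ++ [(p.1, cost + p.2, path ++ [p.1])]) rest)

def branch_and_bound_greedy_heuristic (start : Int) (goal : Int) : List Int :=
  pvLoop goal ((goal - start).natAbs + 1) [(start, 0, [start])]

-- ===== PORT B =====
def branch_and_bound_greedy_heuristic_alt (start : Int) (goal : Int) : List Int :=
  if goal ≥ start then PySem.List.pyRange start (goal + 1) 1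
  else PySem.List.pyRange start (goal - 1) (-1)

-- ===== PRECONDITION & SPEC =====
def Spec_branch_and_bound_greedy_heuristic (start : Int) (goal : Int) (out : List Int) : Prop := out = branch_and_bound_greedy_heuristic_alt start goal
instance (start : Int) (goal : Int) (out : List Int) : Decidable (Spec_branch_and_bound_greedy_heuristic start goal out) := by unfold Spec_branch_and_bound_greedy_heuristic; infer_instance

-- ===== CLAIM (what is proved, stated in full; the proofs are below) =====
def Claim_equal_branch_and_bound_greedy_heuristic : Prop := ∀ (start : Int) (goal : Int), Dom_branch_and_bound_greedy_heuristic start goal → Spec_branch_and_bound_greedy_heuristic start goal (branch_and_bound_greedy_heuristic start goal)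

-- ===== LEMMAS AND PROOFS =====

-- the straight remainder of the path strictly after cur
def pvTail (cur goal : Int) : List Int :=
  if cur ≤ goal then PySem.List.pyRange (cur + 1) (goal + 1) 1
  else PySem.List.pyRange (cur - 1) (goal - 1) (-1)

lemma pvTail_self (g : Int) : pvTail g g = [] := by
  simp [pvTail, PySem.List.pyRange_one_eq_nil]

lemma pvTail_step_up {cur goal : Int} (h : cur < goal) :
    pvTail cur goal = (cur + 1) :: pvTail (cur + 1) goal := by
  unfold pvTail
  rw [if_pos (by omega), if_pos (by omega), PySem.List.pyRange_one_cons (by omega)]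

lemma pvTail_step_down {cur goal : Int} (h : goal < cur) :
    pvTail cur goal = (cur - 1) :: pvTail (cur - 1) goal := by
  unfold pvTail
  rw [if_neg (by omega), PySem.List.pyRange_neg_one_cons (by omega)]
  by_cases h2 : cur - 1 ≤ goal
  · have : cur - 1 = goal := by omega
    subst this
    rw [if_pos (by omega)]
    simp [PySem.List.pyRange_one_eq_nil, PySem.List.pyRange_neg_one_eq_nil]
  · rw [if_neg h2]

-- min over the open list picks a strictly minimal element
lemma pv_min?_strict {α β : Type} [LinearOrder β] (key : α → β) (pre post : List α) (f : α)
    (h : ∀ e, e ∈ pre ∨ e ∈ post → key f < key e) :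
    PySem.List.min? (pre ++ f :: post) key = some f := by
  cases hm : PySem.List.min? (pre ++ f :: post) key with
  | none =>
    have := (PySem.List.min?_eq_none_iff (xs := pre ++ f :: post) (key := key)).mp hm
    simp at this
  | some m =>
    have hmem : m ∈ pre ++ f :: post := PySem.List.min?_mem hm
    have hle : key m ≤ key f := PySem.List.min?_isMin hm f (by simp)
    rcases List.mem_append.mp hmem with hp | hc
    · exact absurd hle (not_le.mpr (h m (Or.inl hp)))
    · rcases List.mem_cons.mp hc with rfl | hq
      · rfl
      · exact absurd hle (not_le.mpr (h m (Or.inr hq)))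

lemma pv_remove_mid (pre post : List (Int × Int × List Int)) (f : Int × Int × List Int)
    (hf : f ∉ pre) : PySem.List.remove? (pre ++ f :: post) f = some (pre ++ post) := by
  induction pre with
  | nil => simp
  | cons x xs ih =>
    simp only [List.mem_cons, not_or] at hf
    rw [List.cons_append, PySem.List.remove?_cons_of_ne _ (fun h => hf.1 h.symm), ih hf.2]
    rfl

-- invariant: the open list is junk of f-value ≥ c + n + 2 around one frontier entry
-- (cur, c, path) with f-value c + n, where n = |goal - cur|; the loop then returns
-- path followed by the straight remainder to the goal.
lemma pvLoop_straight : ∀ (n : Nat) (cur c : Int) (path : List Int)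
    (pre post : List (Int × Int × List Int)) (fuel : Nat) (goal : Int),
    (goal - cur).natAbs = n → n < fuel →
    (∀ e, e ∈ pre ∨ e ∈ post → (c + n + 2 : Int) ≤ e.2.1 + pvHeuristic e.1 goal) →
    pvLoop goal fuel (pre ++ (cur, c, path) :: post) = path ++ pvTail cur goal := by
  intro n
  induction n with
  | zero =>
    intro cur c path pre post fuel goal hn hfuel hkey
    obtain ⟨m, rfl⟩ : ∃ m, fuel = m + 1 := ⟨fuel - 1, by omega⟩
    have hcg : cur = goal := by omega
    subst hcg
    have hmin := pv_min?_strict (fun x => x.2.1 + pvHeuristic x.1 cur) pre post (cur, c, path)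
      (by intro e he; have := hkey e he; simp [pvHeuristic] at *; omega)
    simp [pvLoop, hmin, pvTail_self]
  | succ k ih =>
    intro cur c path pre post fuel goal hn hfuel hkey
    obtain ⟨m, rfl⟩ : ∃ m, fuel = m + 1 := ⟨fuel - 1, by omega⟩
    have hne : cur ≠ goal := by omega
    have hstrict : ∀ e, e ∈ pre ∨ e ∈ post →
        ((cur, c, path).2.1 + pvHeuristic (cur, c, path).1 goal : Int) < e.2.1 + pvHeuristic e.1 goal := by
      intro e he
      have := hkey e he
      simp only [pvHeuristic] at *
      have : |goal - cur| = (k + 1 : Int) := by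
        rw [Int.abs_eq_natAbs, hn]; push_cast; ring
      omega
    have hmin := pv_min?_strict (fun x => x.2.1 + pvHeuristic x.1 goal) pre post (cur, c, path) hstrict
    have hnotpre : (cur, c, path) ∉ pre := by
      intro hmem
      exact absurd (hstrict _ (Or.inl hmem)) (lt_irrefl _)
    simp only [pvLoop, hmin, pv_remove_mid pre post _ hnotpre, Option.getD_some, if_neg hne]
    simp only [pvGetNeighbors, List.foldl_cons, List.foldl_nil]
    by_cases hdir : cur < goal
    · -- frontier moves to cur + 1, the cur - 1 entry joins the junk
      have habs : |goal - cur| = (k + 1 : Int) := by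
        rw [Int.abs_eq_natAbs, hn]; push_cast; ring
      have hstep := ih (cur + 1) (c + 1) (path ++ [cur + 1])
        ((pre ++ post) ++ [(cur - 1, c + 1, path ++ [cur - 1])]) [] m goal
        (by omega) (by omega)
        (by
          intro e he
          simp only [List.mem_append, List.mem_singleton, List.not_mem_nil, or_false] at he
          rcases he with (hp | hq) | rfl
          · have := hkey e (Or.inl hp); push_cast at *; omega
          · have := hkey e (Or.inr hq); push_cast at *; omega
          · simp only [pvHeuristic]
            have : |goal - (cur - 1)| = (k + 2 : Int) := by
              rw [abs_of_pos (by omega)]; omega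
            push_cast at *; omega)
      have hL : pre ++ post ++ [(cur - 1, c + 1, path ++ [cur - 1])] ++ [(cur + 1, c + 1, path ++ [cur + 1])]
          = (pre ++ post ++ [(cur - 1, c + 1, path ++ [cur - 1])]) ++ (cur + 1, c + 1, path ++ [cur + 1]) :: [] := by
        simp
      rw [hL, hstep, pvTail_step_up hdir]
      simp
    · -- frontier moves to cur - 1; the cur + 1 entry is junk at the end
      have hlt : goal < cur := by omega
      have hstep := ih (cur - 1) (c + 1) (path ++ [cur - 1])
        (pre ++ post) [(cur + 1, c + 1, path ++ [cur + 1])] m goal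
        (by omega) (by omega)
        (by
          intro e he
          rcases he with hp | hq
          · rcases List.mem_append.mp hp with hp1 | hp2
            · have := hkey e (Or.inl hp1); push_cast at *; omega
            · have := hkey e (Or.inr hp2); push_cast at *; omega
          · simp only [List.mem_singleton] at hq
            subst hq
            simp only [pvHeuristic]
            have : |goal - (cur + 1)| = (k + 2 : Int) := by
              rw [abs_of_neg (by omega)]; omega
            push_cast at *; omega)
      have hL : pre ++ post ++ [(cur - 1, c + 1, path ++ [cur - 1])] ++ [(cur + 1, c + 1, path ++ [cur + 1])]
          = (pre ++ post) ++ (cur - 1, c + 1, path ++ [cur - 1]) :: [(cur + 1, c + 1, path ++ [cur + 1])] := by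
        simp
      rw [hL, hstep, pvTail_step_down hlt]
      simp

-- ===== VERDICT (by name: the statement is the Claim_ definition above) =====
theorem branch_and_bound_greedy_heuristic_spec : Claim_equal_branch_and_bound_greedy_heuristic := by
  intro start goal _
  unfold Spec_branch_and_bound_greedy_heuristic branch_and_bound_greedy_heuristic
  have h0 : [((start : Int), (0 : Int), [start])]
      = ([] : List (Int × Int × List Int)) ++ (start, (0 : Int), [start]) :: [] := by simp
  rw [h0, pvLoop_straight ((goal - start).natAbs) start 0 [start] [] []
      ((goal - start).natAbs + 1) goal rfl (by omega) (by intro e he; rcases he with h | h <;> simp at h)]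
  unfold branch_and_bound_greedy_heuristic_alt pvTail
  by_cases hd : start ≤ goal
  · rw [if_pos (by omega), if_pos hd, PySem.List.pyRange_one_cons (show start < goal + 1 by omega)]
    simp
  · rw [if_neg (by omega), if_neg hd, PySem.List.pyRange_neg_one_cons (show goal - 1 < start by omega)]
    simp
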